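-- pv_equiv track=rewrite | github.com/aibryanov/avito_task | preprop_utils.py | mark_word_starts
-- ===== SOURCE A (Python) =====
-- from typing import List, Tuple
--
-- def mark_word_starts(text: str) -> Tuple[str, List[int]]:
--     """
--     Создать вектор таргета и текст без пробелов
--     Единица = начало слова, остальные символы = 0
--
--         text: текст с пробелами
--
--         return: (текст без пробелов, список меток)
--     """
--     words = text.split()
--     clean_text = "".join(words)
--     labels = []
--
--     for word in words:
--         if not word:
--             continue
--         # первый символ слова = 1, остальные = 0
--         labels.append(1)
--         labels.extend([0] * (len(word) - 1))
--     labels[0] = 0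
--
--     return clean_text, labels
-- ===== SOURCE B (Python) =====
-- from typing import List, Tuple
--
-- def mark_word_starts(text: str) -> Tuple[str, List[int]]:
--     clean_chars = []
--     labels = []
--     prev_was_space = True
--     for ch in text:
--         if ch.isspace():
--             prev_was_space = True
--             continue
--         clean_chars.append(ch)
--         labels.append(1 if prev_was_space else 0)
--         prev_was_space = False
--     labels[0] = 0
--     return "".join(clean_chars), labels
-- ===== Notes on version B (the rewrite author's own statement) =====
-- stated objective: simpler
-- what changed: Replaces split/join plus a per-word labelling loop with a single character scan that carries a prev_was_space flag, emitting each non-space char and its label in one pass without materialising the word list.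
import Mathlib
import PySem

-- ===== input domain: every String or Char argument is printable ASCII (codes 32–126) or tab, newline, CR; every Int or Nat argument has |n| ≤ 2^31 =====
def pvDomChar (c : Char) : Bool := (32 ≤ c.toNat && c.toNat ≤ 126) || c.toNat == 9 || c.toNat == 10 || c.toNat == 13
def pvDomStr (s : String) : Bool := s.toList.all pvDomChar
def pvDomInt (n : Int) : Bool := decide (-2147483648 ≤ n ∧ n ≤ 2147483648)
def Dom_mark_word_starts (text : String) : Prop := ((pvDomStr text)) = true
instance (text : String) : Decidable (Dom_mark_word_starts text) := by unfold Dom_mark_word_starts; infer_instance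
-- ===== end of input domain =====

-- B replaces split/join + a per-word loop by one character scan with a prev_was_space flag (simpler, one pass, no word list).
-- Both A and B raise IndexError on all-whitespace/empty input (labels[0] = 0 on an empty list): Pre_ excludes exactly those inputs.

-- ===== PORT A =====
def mark_word_starts (text : String) : String × List Int :=
  let words := PySem.Chars.split₀ text.toList
  let clean_text := PySem.Chars.join [] words
  let labels : List Int := words.foldl (fun acc word =>
      if word = [] then acc
      else (acc ++ [1]) ++ List.replicate (word.length - 1) (0 : Int)) []
  -- labels[0] = 0 : Python raises IndexError when labels = [] (excluded by Pre_); List.set is a no-op there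
  let labels := labels.set 0 0
  (String.ofList clean_text, labels)

-- ===== PORT B =====
def mark_word_starts_alt (text : String) : String × List Int :=
  let st := text.toList.foldl (fun (st : List Char × List Int × Bool) ch =>
      if PySem.Chars.isspace ch then (st.1, st.2.1, true)
      else (st.1 ++ [ch], st.2.1 ++ [if st.2.2 then (1 : Int) else 0], false))
    ([], [], true)
  -- labels[0] = 0 : Python raises IndexError when labels = [] (excluded by Pre_); List.set is a no-op there
  (String.ofList st.1, (st.2.1).set 0 0)

-- ===== PRECONDITION & SPEC =====
-- Pre_ excludes exactly the inputs with no non-whitespace character, on which A (and B) raises IndexError at labels[0] = 0.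
def Pre_mark_word_starts (text : String) : Prop :=
  (text.toList.any (fun c => ! PySem.Chars.isspace c)) = true
instance (text : String) : Decidable (Pre_mark_word_starts text) := by
  unfold Pre_mark_word_starts; infer_instance

def pvWitness_mark_word_starts : String := "a b"

def Spec_mark_word_starts (text : String) (out : String × List Int) : Prop := out = mark_word_starts_alt text
instance (text : String) (out : String × List Int) : Decidable (Spec_mark_word_starts text out) := by unfold Spec_mark_word_starts; infer_instance

-- ===== CLAIM (what is proved, stated in full; the proofs are below) =====
def Claim_equal_mark_word_starts : Prop := ∀ (text : String), Dom_mark_word_starts text → Pre_mark_word_starts text → Spec_mark_word_starts text (mark_word_starts text)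

-- ===== LEMMAS AND PROOFS =====

-- labels contributed by one word
def pvWl (w : List Char) : List Int :=
  if w = [] then [] else 1 :: List.replicate (w.length - 1) (0 : Int)

lemma pv_flatten_intersperse_nil (parts : List (List Char)) :
    (List.intersperse ([] : List Char) parts).flatten = parts.flatten := by
  induction parts with
  | nil => simp
  | cons h t ih => cases t <;> simp_all [List.intersperse]

-- B's fold, started from the state corresponding to (cur, acc), computes flatten / flatMap pvWl of split₀.go
lemma pv_fold_go (rest cur : List Char) (acc : List (List Char)) :
    (rest.foldl (fun (st : List Char × List Int × Bool) ch =>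
        if PySem.Chars.isspace ch then (st.1, st.2.1, true)
        else (st.1 ++ [ch], st.2.1 ++ [if st.2.2 then (1 : Int) else 0], false))
      (acc.reverse.flatten ++ cur.reverse,
       acc.reverse.flatMap pvWl ++ pvWl cur.reverse,
       cur.isEmpty)).1 = (PySem.Chars.split₀.go rest cur acc).flatten
    ∧ (rest.foldl (fun (st : List Char × List Int × Bool) ch =>
        if PySem.Chars.isspace ch then (st.1, st.2.1, true)
        else (st.1 ++ [ch], st.2.1 ++ [if st.2.2 then (1 : Int) else 0], false))
      (acc.reverse.flatten ++ cur.reverse,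
       acc.reverse.flatMap pvWl ++ pvWl cur.reverse,
       cur.isEmpty)).2.1 = (PySem.Chars.split₀.go rest cur acc).flatMap pvWl := by
  induction rest generalizing cur acc with
  | nil =>
    rw [PySem.Chars.split₀.go]
    by_cases h : cur = []
    · subst h; simp [pvWl]
    · simp [h, List.isEmpty_iff, pvWl]
  | cons c rest ih =>
    rw [PySem.Chars.split₀.go]
    simp only [List.foldl_cons]
    by_cases hs : PySem.Chars.isspace c
    · by_cases h : cur = []
      · subst h
        simpa [hs] using ih [] acc
      · have := ih [] (cur.reverse :: acc)
        simp only [List.reverse_cons, List.flatten_append, List.flatMap_append,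
          List.flatten_cons, List.flatMap_cons, List.flatten_nil, List.flatMap_nil,
          List.append_nil, List.reverse_nil, List.isEmpty_nil, pvWl,
          List.append_assoc] at this ⊢
        simpa [hs, h, List.isEmpty_iff, pvWl]
    · have hlab : pvWl (cur.reverse ++ [c])
          = pvWl cur.reverse ++ [if cur.isEmpty then (1 : Int) else 0] := by
        by_cases h : cur = []
        · subst h; simp [pvWl]
        · have hne : cur.reverse ++ [c] ≠ [] := by simp
          have hrne : cur.reverse ≠ [] := by simpa using h
          have hlen : 1 ≤ cur.length := List.length_pos_iff.mpr h
          obtain ⟨n, hn⟩ : ∃ n, cur.length = n + 1 :=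
            ⟨cur.length - 1, by omega⟩
          simp only [pvWl, hne, hrne]
          simp [h, List.length_append, hn, List.replicate_succ']
      have := ih (c :: cur) acc
      simp only [List.reverse_cons, List.isEmpty_cons] at this
      rw [hlab] at this
      simpa [hs, List.append_assoc] using this

-- A's labels loop is the flatMap of pvWl over the word list
lemma pv_labels_eq (ws : List (List Char)) :
    ws.foldl (fun acc word =>
      if word = [] then acc
      else (acc ++ [1]) ++ List.replicate (word.length - 1) (0 : Int)) []
    = ws.flatMap pvWl := by
  have h : ws.foldl (fun acc word =>
      if word = [] then acc
      else (acc ++ [1]) ++ List.replicate (word.length - 1) (0 : Int)) []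
      = ws.foldl (fun acc word => acc ++ pvWl word) [] := by
    refine PySem.List.foldl_congr_mem ws _ _ [] (fun acc w _ => ?_)
    by_cases h : w = [] <;> simp [pvWl, h]
  rw [h, PySem.List.foldl_append_eq_flatMap]
  simp

-- ===== VERDICT (by name: the statement is the Claim_ definition above) =====
theorem mark_word_starts_spec : Claim_equal_mark_word_starts := by
  intro text _ _
  unfold Spec_mark_word_starts
  obtain ⟨h1, h2⟩ := pv_fold_go text.toList [] []
  simp only [List.reverse_nil, List.flatten_nil, List.flatMap_nil, List.append_nil, List.isEmpty_nil, pvWl, if_true] at h1 h2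
  simp only [mark_word_starts, mark_word_starts_alt, PySem.Chars.join, List.intercalate,
    pv_flatten_intersperse_nil, pv_labels_eq, PySem.Chars.split₀]
  rw [← h1, ← h2]
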